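-- pv_equiv track=rewrite | github.com/notjackl3/sop-ify | utils.py | identify_changes
-- ===== SOURCE A (Python) =====
-- from typing import List, Tuple
--
-- def identify_changes(old: List[Tuple], new: List[Tuple]) -> Tuple[List, List, List, List]:
--     matched = []
--     changed = []
--     added = []
--     deleted = []
--
--     used_new_indices = set()
--     used_old_indices = set()
--
--     for i, old_item in enumerate(old):
--         for j, new_item in enumerate(new):
--             if j in used_new_indices:
--                 continue
--             if old_item == new_item:
--                 matched.append(old_item)
--                 used_new_indices.add(j)
--                 used_old_indices.add(i)
--                 break
--
--     for i, old_item in enumerate(old):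
--         if i in used_old_indices:
--             continue
--         for j, new_item in enumerate(new):
--             if j in used_new_indices:
--                 continue
--             if old_item[0] == new_item[0]:
--                 changed.append((old_item, new_item))
--                 used_new_indices.add(j)
--                 used_old_indices.add(i)
--                 break
--
--     for i, old_item in enumerate(old):
--         if i not in used_old_indices:
--             deleted.append(old_item)
--
--     for j, new_item in enumerate(new):
--         if j not in used_new_indices:
--             added.append(new_item)
--
--     return matched, changed, added, deleted
-- ===== SOURCE B (Python) =====
-- def identify_changes(old, new):
--     # Index queues over `new` (by full value, then by first field); each old item
--     # pops the first unused candidate from its queue instead of rescanning `new`.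
--     by_value = {}
--     for j, item in enumerate(new):
--         by_value.setdefault(tuple(item), []).append(j)
--     used_new = set()
--     matched = []
--     remaining = []
--     for item in old:
--         q = by_value.get(tuple(item))
--         if q:
--             used_new.add(q.pop(0))
--             matched.append(item)
--         else:
--             remaining.append(item)
--     by_key = {}
--     for j, item in enumerate(new):
--         if j not in used_new:
--             by_key.setdefault(item[0], []).append((j, item))
--     changed = []
--     deleted = []
--     for item in remaining:
--         q = by_key.get(item[0])
--         if q:
--             j, nitem = q.pop(0)
--             used_new.add(j)
--             changed.append((item, nitem))
--         else:
--             deleted.append(item)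
--     added = [item for j, item in enumerate(new) if j not in used_new]
--     return matched, changed, added, deleted
-- ===== Notes on version B (the rewrite author's own statement) =====
-- stated objective: alternative
-- what changed: Instead of rescanning `new` for each old item with used-index skip sets, B builds ordered index queues (by full value, then by first field) once and pops the first unused candidate from the matching queue.
-- outside the precondition, e.g. on identify_changes([()], []): A returns ([], [], [], [()]), B raises IndexError; on identify_changes([()], [()]): A returns ([()], [], [], []), B returns ([()], [], [], [])
import Mathlib
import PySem

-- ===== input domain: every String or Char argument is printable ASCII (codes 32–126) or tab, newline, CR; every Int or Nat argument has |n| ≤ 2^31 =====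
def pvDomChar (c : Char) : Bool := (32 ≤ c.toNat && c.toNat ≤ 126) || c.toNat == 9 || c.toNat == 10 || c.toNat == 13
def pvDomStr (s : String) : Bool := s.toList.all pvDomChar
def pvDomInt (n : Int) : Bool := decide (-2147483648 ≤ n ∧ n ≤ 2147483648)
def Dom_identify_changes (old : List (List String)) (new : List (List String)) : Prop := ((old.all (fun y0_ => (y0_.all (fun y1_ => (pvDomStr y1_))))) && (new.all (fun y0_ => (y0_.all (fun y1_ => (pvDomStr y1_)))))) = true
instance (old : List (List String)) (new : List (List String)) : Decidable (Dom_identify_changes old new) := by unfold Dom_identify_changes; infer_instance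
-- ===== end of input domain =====

-- B replaces A's nested rescans of `new` by index queues built once (by full
-- value, then by first field), popping the first unused candidate per old item.
-- Equivalence is about return values (neither Python mutates its arguments).

-- ===== PORT A =====
-- inner loop of pass 1: first j not in used_new with old_item == new_item
def aFindEq (un : PySem.Set Int) (oi : List String) : List (Int × List String) → Option Int
  | [] => none
  | (j, ni) :: rest =>
    if PySem.Set.contains un j then aFindEq un oi rest
    else if oi == ni then some j
    else aFindEq un oi rest

-- pass 1: for i, old_item in enumerate(old): scan new, append to matched on first equal unused
def aPass1 (pairsN : List (Int × List String)) :
    List (Int × List String) →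
    List (List String) × PySem.Set Int × PySem.Set Int →
    List (List String) × PySem.Set Int × PySem.Set Int
  | [], st => st
  | (i, oi) :: rest, (m, un, uo) =>
    match aFindEq un oi pairsN with
    | some j => aPass1 pairsN rest (m ++ [oi], PySem.Set.add un j, PySem.Set.add uo i)
    | none => aPass1 pairsN rest (m, un, uo)

-- inner loop of pass 2: first unused (j, new_item) with old_item[0] == new_item[0]
-- (item[0] is ported as PySem.List.pyGet? · 0; Pre_ keeps items nonempty, where this is exact)
def aFindKey (un : PySem.Set Int) (k : Option String) : List (Int × List String) → Option (Int × List String)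
  | [] => none
  | (j, ni) :: rest =>
    if PySem.Set.contains un j then aFindKey un k rest
    else if k == PySem.List.pyGet? ni 0 then some (j, ni)
    else aFindKey un k rest

-- pass 2: unmatched old items paired by first field
def aPass2 (pairsN : List (Int × List String)) :
    List (Int × List String) →
    List (List String × List String) × PySem.Set Int × PySem.Set Int →
    List (List String × List String) × PySem.Set Int × PySem.Set Int
  | [], st => st
  | (i, oi) :: rest, (c, un, uo) =>
    if PySem.Set.contains uo i then aPass2 pairsN rest (c, un, uo)
    else
      match aFindKey un (PySem.List.pyGet? oi 0) pairsN with
      | some (j, ni) => aPass2 pairsN rest (c ++ [(oi, ni)], PySem.Set.add un j, PySem.Set.add uo i)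
      | none => aPass2 pairsN rest (c, un, uo)

def identify_changes (old : List (List String)) (new : List (List String)) :
    List (List String) × (List (List String × List String)) × List (List String) × List (List String) :=
  let pairsO := PySem.List.enumerate old
  let pairsN := PySem.List.enumerate new
  let r1 := aPass1 pairsN pairsO ([], PySem.Set.empty, PySem.Set.empty)
  let r2 := aPass2 pairsN pairsO ([], r1.2.1, r1.2.2)
  let deleted := pairsO.foldl (fun acc p => if PySem.Set.contains r2.2.2 p.1 then acc else acc ++ [p.2]) []
  let added := pairsN.foldl (fun acc p => if PySem.Set.contains r2.2.1 p.1 then acc else acc ++ [p.2]) []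
  (r1.1, r2.1, added, deleted)

-- ===== PORT B =====
-- by_value: for j, item in enumerate(new): by_value.setdefault(tuple(item), []).append(j)
def bByValue (pairsN : List (Int × List String)) : PySem.Dict (List String) (List Int) :=
  pairsN.foldl (fun d p => d.modify p.2 [] (· ++ [p.1])) PySem.Dict.empty

-- pass 1: pop the first unused index with equal value from item's queue
def bPass1 :
    List (List String) →
    PySem.Dict (List String) (List Int) × PySem.Set Int × List (List String) × List (List String) →
    PySem.Dict (List String) (List Int) × PySem.Set Int × List (List String) × List (List String)
  | [], st => st
  | item :: os, (bv, un, m, rem) =>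
    match bv.getD item [] with
    | [] => bPass1 os (bv, un, m, rem ++ [item])
    | j :: q => bPass1 os (bv.insert item q, PySem.Set.add un j, m ++ [item], rem)

-- by_key: for j, item in enumerate(new): if j not in used_new: by_key.setdefault(item[0], []).append((j, item))
def bByKey (pairsN : List (Int × List String)) (un : PySem.Set Int) :
    PySem.Dict (Option String) (List (Int × List String)) :=
  pairsN.foldl
    (fun d p => if PySem.Set.contains un p.1 then d
                else d.modify (PySem.List.pyGet? p.2 0) [] (· ++ [p]))
    PySem.Dict.empty

-- pass 2 over the remaining old items: pop the first unused (j, nitem) with the same first field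
def bPass2 :
    List (List String) →
    PySem.Dict (Option String) (List (Int × List String)) × PySem.Set Int ×
      List (List String × List String) × List (List String) →
    PySem.Dict (Option String) (List (Int × List String)) × PySem.Set Int ×
      List (List String × List String) × List (List String)
  | [], st => st
  | item :: os, (bk, un, c, del) =>
    match bk.getD (PySem.List.pyGet? item 0) [] with
    | [] => bPass2 os (bk, un, c, del ++ [item])
    | (j, ni) :: q =>
        bPass2 os (bk.insert (PySem.List.pyGet? item 0) q, PySem.Set.add un j, c ++ [(item, ni)], del)

def identify_changes_alt (old : List (List String)) (new : List (List String)) :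
    List (List String) × (List (List String × List String)) × List (List String) × List (List String) :=
  let pairsN := PySem.List.enumerate new
  let r1 := bPass1 old (bByValue pairsN, PySem.Set.empty, [], [])
  let r2 := bPass2 r1.2.2.2 (bByKey pairsN r1.2.1, r1.2.1, [], [])
  let added := pairsN.filterMap (fun p => if PySem.Set.contains r2.2.1 p.1 then none else some p.2)
  (r1.2.2.1, r2.2.2.1, added, r2.2.2.2)

-- ===== PRECONDITION & SPEC =====
-- Pre_ excludes inputs containing an empty item: on those the key access item[0] in
-- pass 2 raises IndexError in A on some such inputs (and in B on others), so the
-- behaviour there is not stable between the two scans.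
def Pre_identify_changes (old : List (List String)) (new : List (List String)) : Prop :=
  [] ∉ old ∧ [] ∉ new
instance (old : List (List String)) (new : List (List String)) : Decidable (Pre_identify_changes old new) := by unfold Pre_identify_changes; infer_instance
def pvWitness_identify_changes : List (List String) × List (List String) :=
  ([["a"], ["b", "c"]], [["a"], ["b", "d"]])
def Spec_identify_changes (old : List (List String)) (new : List (List String)) (out : List (List String) × (List (List String × List String)) × List (List String) × List (List String)) : Prop := out = identify_changes_alt old new
instance (old : List (List String)) (new : List (List String)) (out : List (List String) × (List (List String × List String)) × List (List String) × List (List String)) : Decidable (Spec_identify_changes old new out) := by unfold Spec_identify_changes; infer_instance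

-- ===== CLAIM (what is proved, stated in full; the proofs are below) =====
def Claim_equal_identify_changes : Prop := ∀ (old : List (List String)) (new : List (List String)), Dom_identify_changes old new → Pre_identify_changes old new → Spec_identify_changes old new (identify_changes old new)

-- ===== LEMMAS AND PROOFS =====

theorem pv_contains_true {α : Type} [BEq α] [LawfulBEq α] (s : PySem.Set α) (x : α)
    (h : x ∈ s) : PySem.Set.contains s x = true := (PySem.Set.contains_iff s x).mpr h

theorem pv_contains_false {α : Type} [BEq α] [LawfulBEq α] (s : PySem.Set α) (x : α)
    (h : x ∉ s) : PySem.Set.contains s x = false := by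
  cases h2 : PySem.Set.contains s x
  · rfl
  · exact absurd ((PySem.Set.contains_iff s x).mp h2) h

theorem pv_contains_add (un : PySem.Set Int) (j x : Int) :
    PySem.Set.contains (PySem.Set.add un j) x = (PySem.Set.contains un x || x == j) := by
  apply Bool.eq_iff_iff.mpr
  simp [PySem.Set.mem_add, beq_iff_eq]

theorem filter_shift {κ : Type} [BEq κ] [LawfulBEq κ] (pN : List (Int × List String))
    (f : Int × List String → κ) (un : PySem.Set Int) (j₀ : Int) (v : κ) :
    pN.filter (fun p => !(PySem.Set.contains (PySem.Set.add un j₀) p.1) && (f p == v))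
      = (pN.filter (fun p => !(PySem.Set.contains un p.1) && (f p == v))).filter
          (fun p => !(p.1 == j₀)) := by
  rw [List.filter_filter]
  apply List.filter_congr
  intro x _
  rw [pv_contains_add]
  cases PySem.Set.contains un x.1 <;> cases hx : (x.1 == j₀) <;> cases f x == v <;> rfl

theorem aFindEq_eq (un : PySem.Set Int) (oi : List String) (l : List (Int × List String)) :
    aFindEq un oi l =
      ((l.filter (fun p => !(PySem.Set.contains un p.1) && (p.2 == oi))).head?).map (·.1) := by
  induction l with
  | nil => rfl
  | cons p rest ih =>
    obtain ⟨j, ni⟩ := p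
    by_cases hc : PySem.Set.contains un j = true
    · have hpred : (!(PySem.Set.contains un (j, ni).1) && ((j, ni).2 == oi)) = false := by
        show (!(PySem.Set.contains un j) && (ni == oi)) = false
        rw [hc]; rfl
      rw [aFindEq, if_pos hc, List.filter_cons, hpred, ih]
      simp
    · have hc' : PySem.Set.contains un j = false := by simpa using hc
      by_cases he : oi = ni
      · have hpred : (!(PySem.Set.contains un (j, ni).1) && ((j, ni).2 == oi)) = true := by
          show (!(PySem.Set.contains un j) && (ni == oi)) = true
          rw [hc']; simp [he]
        rw [aFindEq, if_neg hc, if_pos (by simp [he] : (oi == ni) = true), List.filter_cons, hpred]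
        simp
      · have hpred : (!(PySem.Set.contains un (j, ni).1) && ((j, ni).2 == oi)) = false := by
          show (!(PySem.Set.contains un j) && (ni == oi)) = false
          rw [hc']; simp; exact fun h => he h.symm
        rw [aFindEq, if_neg hc, if_neg (by simp [he] : ¬ ((oi == ni) = true)), List.filter_cons, hpred, ih]
        simp

theorem aFindKey_eq (un : PySem.Set Int) (k : Option String) (l : List (Int × List String)) :
    aFindKey un k l =
      (l.filter (fun p => !(PySem.Set.contains un p.1) && (PySem.List.pyGet? p.2 0 == k))).head? := by
  induction l with
  | nil => rfl
  | cons p rest ih =>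
    obtain ⟨j, ni⟩ := p
    by_cases hc : PySem.Set.contains un j = true
    · have hpred : (!(PySem.Set.contains un (j, ni).1) && (PySem.List.pyGet? (j, ni).2 0 == k)) = false := by
        show (!(PySem.Set.contains un j) && (PySem.List.pyGet? ni 0 == k)) = false
        rw [hc]; rfl
      rw [aFindKey, if_pos hc, List.filter_cons, hpred, ih]
      simp
    · have hc' : PySem.Set.contains un j = false := by simpa using hc
      by_cases he : k = PySem.List.pyGet? ni 0
      · have hpred : (!(PySem.Set.contains un (j, ni).1) && (PySem.List.pyGet? (j, ni).2 0 == k)) = true := by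
          show (!(PySem.Set.contains un j) && (PySem.List.pyGet? ni 0 == k)) = true
          rw [hc']; simp [he]
        rw [aFindKey, if_neg hc, if_pos (by simp [he] : (k == PySem.List.pyGet? ni 0) = true), List.filter_cons, hpred]
        simp
      · have hpred : (!(PySem.Set.contains un (j, ni).1) && (PySem.List.pyGet? (j, ni).2 0 == k)) = false := by
          show (!(PySem.Set.contains un j) && (PySem.List.pyGet? ni 0 == k)) = false
          rw [hc']; simp; exact fun h => he h.symm
        rw [aFindKey, if_neg hc, if_neg (by simp [he] : ¬ ((k == PySem.List.pyGet? ni 0) = true)), List.filter_cons, hpred, ih]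
        simp

theorem queue_step {κ β : Type} [BEq κ] [LawfulBEq κ] [DecidableEq κ] (f : Int × List String → κ)
    (g : Int × List String → β) (pN : List (Int × List String))
    (hnod : (pN.map (·.1)).Nodup) (un : PySem.Set Int) (k : κ)
    (d : PySem.Dict κ (List β))
    (hinv : ∀ v, d.getD v [] = (pN.filter (fun p => !(PySem.Set.contains un p.1) && (f p == v))).map g)
    (p₀ : Int × List String) (t : List (Int × List String))
    (hq : pN.filter (fun p => !(PySem.Set.contains un p.1) && (f p == k)) = p₀ :: t) :
    ∀ v, (d.insert k (t.map g)).getD v [] =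
      (pN.filter (fun p => !(PySem.Set.contains (PySem.Set.add un p₀.1) p.1) && (f p == v))).map g := by
  have hmem : p₀ ∈ pN.filter (fun p => !(PySem.Set.contains un p.1) && (f p == k)) := by
    rw [hq]; exact List.mem_cons_self
  have hp₀N : p₀ ∈ pN := List.mem_of_mem_filter hmem
  have hp₀pred := List.of_mem_filter hmem
  have hfk : f p₀ = k := by
    have := (Bool.and_eq_true _ _).mp hp₀pred |>.2
    exact beq_iff_eq.mp this
  have hinj : ∀ x ∈ pN, ∀ y ∈ pN, x.1 = y.1 → x = y := by
    intro x hx y hy hxy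
    exact List.inj_on_of_nodup_map hnod hx hy hxy
  intro v
  rw [filter_shift, PySem.Dict.getD_insert]
  by_cases hv : v = k
  · subst hv
    rw [if_pos rfl, hq]
    have hnodf : ((p₀ :: t).map (·.1)).Nodup := by
      rw [← hq]
      exact hnod.sublist (List.filter_sublist.map _)
    rw [List.filter_cons, if_neg (by simp)]
    have ht : t.filter (fun p => !(p.1 == p₀.1)) = t := by
      apply List.filter_eq_self.mpr
      intro a ha
      simp only [Bool.not_eq_eq_eq_not, Bool.not_true, beq_eq_false_iff_ne, ne_eq]
      intro hne
      have : p₀.1 ∉ t.map (·.1) := by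
        have := hnodf
        simp only [List.map_cons, List.nodup_cons] at this
        exact this.1
      exact this (by rw [← hne]; exact List.mem_map_of_mem ha)
    rw [ht]
  · rw [if_neg hv, hinv v]
    congr 1
    symm
    apply List.filter_eq_self.mpr
    intro a ha
    have haN : a ∈ pN := List.mem_of_mem_filter ha
    have hapred := List.of_mem_filter ha
    have hfv : f a = v := beq_iff_eq.mp ((Bool.and_eq_true _ _).mp hapred).2
    simp only [Bool.not_eq_eq_eq_not, Bool.not_true, beq_eq_false_iff_ne, ne_eq]
    intro hne
    have : a = p₀ := hinj a haN p₀ hp₀N hne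
    exact hv (by rw [← hfv, this, hfk])

theorem pass1_rel (pN : List (Int × List String)) (hnod : (pN.map (·.1)).Nodup) :
    ∀ (ops : List (Int × List String)) (m : List (List String)) (un uo : PySem.Set Int)
      (bv : PySem.Dict (List String) (List Int)) (rem : List (List String)),
      (∀ v, bv.getD v [] = (pN.filter (fun p => !(PySem.Set.contains un p.1) && (p.2 == v))).map (·.1)) →
      (ops.map (·.1)).Nodup → (∀ p ∈ ops, p.1 ∉ uo) →
      (bPass1 (ops.map (·.2)) (bv, un, m, rem)).2.2.1 = (aPass1 pN ops (m, un, uo)).1 ∧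
      (bPass1 (ops.map (·.2)) (bv, un, m, rem)).2.1 = (aPass1 pN ops (m, un, uo)).2.1 ∧
      (∀ v, (bPass1 (ops.map (·.2)) (bv, un, m, rem)).1.getD v [] =
        (pN.filter (fun p => !(PySem.Set.contains (aPass1 pN ops (m, un, uo)).2.1 p.1) && (p.2 == v))).map (·.1)) ∧
      (bPass1 (ops.map (·.2)) (bv, un, m, rem)).2.2.2 =
        rem ++ (ops.filter (fun p => !(PySem.Set.contains (aPass1 pN ops (m, un, uo)).2.2 p.1))).map (·.2) ∧
      (∀ x ∈ uo, x ∈ (aPass1 pN ops (m, un, uo)).2.2) ∧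
      (∀ x, x ∈ (aPass1 pN ops (m, un, uo)).2.2 → x ∈ uo ∨ x ∈ ops.map (·.1)) := by
  intro ops
  induction ops with
  | nil =>
    intro m un uo bv rem hinv _ _
    refine ⟨rfl, rfl, hinv, by simp [aPass1, bPass1], fun x hx => hx, fun x hx => Or.inl hx⟩
  | cons hd rest ih =>
    obtain ⟨i, oi⟩ := hd
    intro m un uo bv rem hinv hnodops hdisj
    have hnodops' : (i :: rest.map (·.1)).Nodup := by simpa using hnodops
    have hnodrest : (rest.map (·.1)).Nodup := (List.nodup_cons.mp hnodops').2
    have hinotrest : i ∉ rest.map (·.1) := (List.nodup_cons.mp hnodops').1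
    have hiuo : i ∉ uo := hdisj (i, oi) List.mem_cons_self
    cases hq : pN.filter (fun p => !(PySem.Set.contains un p.1) && (p.2 == oi)) with
    | nil =>
      have hfind : aFindEq un oi pN = none := by rw [aFindEq_eq, hq]; rfl
      have hgetD : bv.getD oi [] = [] := by rw [hinv oi, hq]; rfl
      have hstepA : aPass1 pN ((i, oi) :: rest) (m, un, uo) = aPass1 pN rest (m, un, uo) := by
        rw [aPass1, hfind]
      have hstepB : bPass1 (((i, oi) :: rest).map (·.2)) (bv, un, m, rem)
          = bPass1 (rest.map (·.2)) (bv, un, m, rem ++ [oi]) := by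
        simp only [List.map_cons]
        rw [bPass1, hgetD]
      obtain ⟨c1, c2, c3, c4, c5, c6⟩ := ih m un uo bv (rem ++ [oi]) hinv hnodrest
        (fun p hp => hdisj p (List.mem_cons_of_mem _ hp))
      rw [hstepA, hstepB]
      refine ⟨c1, c2, c3, ?_, c5, fun x hx => (c6 x hx).imp_right (List.mem_cons_of_mem _)⟩
      rw [c4, List.filter_cons]
      have hinotA : i ∉ (aPass1 pN rest (m, un, uo)).2.2 := by
        intro hx
        rcases c6 i hx with h | h
        · exact hiuo h
        · exact hinotrest h
      rw [show (!(PySem.Set.contains (aPass1 pN rest (m, un, uo)).2.2 (i, oi).1)) = true by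
        rw [pv_contains_false _ _ hinotA]; rfl]
      rw [if_pos rfl]
      simp
    | cons p₀ t =>
      have hfind : aFindEq un oi pN = some p₀.1 := by rw [aFindEq_eq, hq]; rfl
      have hgetD : bv.getD oi [] = p₀.1 :: t.map (·.1) := by rw [hinv oi, hq]; rfl
      have hstepA : aPass1 pN ((i, oi) :: rest) (m, un, uo)
          = aPass1 pN rest (m ++ [oi], PySem.Set.add un p₀.1, PySem.Set.add uo i) := by
        rw [aPass1, hfind]
      have hstepB : bPass1 (((i, oi) :: rest).map (·.2)) (bv, un, m, rem)
          = bPass1 (rest.map (·.2)) (bv.insert oi (t.map (·.1)), PySem.Set.add un p₀.1, m ++ [oi], rem) := by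
        simp only [List.map_cons]
        rw [bPass1, hgetD]
      have hinv' := queue_step (fun p => p.2) (fun p => p.1) pN hnod un oi bv hinv p₀ t hq
      obtain ⟨c1, c2, c3, c4, c5, c6⟩ := ih (m ++ [oi]) (PySem.Set.add un p₀.1)
        (PySem.Set.add uo i) (bv.insert oi (t.map (·.1))) rem hinv' hnodrest
        (fun p hp => by
          rw [PySem.Set.mem_add _ _ _]
          rintro (h | h)
          · exact hdisj p (List.mem_cons_of_mem _ hp) h
          · exact hinotrest (h ▸ List.mem_map_of_mem hp))
      rw [hstepA, hstepB]
      refine ⟨c1, c2, c3, ?_, ?_, ?_⟩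
      · rw [c4, List.filter_cons]
        have hiA : i ∈ (aPass1 pN rest (m ++ [oi], PySem.Set.add un p₀.1, PySem.Set.add uo i)).2.2 :=
          c5 i ((PySem.Set.mem_add _ _ _).mpr (Or.inr rfl))
        rw [show (!(PySem.Set.contains (aPass1 pN rest (m ++ [oi], PySem.Set.add un p₀.1, PySem.Set.add uo i)).2.2 (i, oi).1)) = false by
          rw [pv_contains_true _ _ hiA]; rfl]
        rw [if_neg (by simp)]
      · intro x hx
        exact c5 x ((PySem.Set.mem_add _ _ _).mpr (Or.inl hx))
      · intro x hx
        rcases c6 x hx with h | h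
        · rcases (PySem.Set.mem_add _ _ _).mp h with h' | h'
          · exact Or.inl h'
          · exact Or.inr (by simp [h'])
        · exact Or.inr (List.mem_cons_of_mem _ h)

theorem pass2_rel (pN : List (Int × List String)) (hnod : (pN.map (·.1)).Nodup) :
    ∀ (ops : List (Int × List String)) (c : List (List String × List String))
      (un uo : PySem.Set Int)
      (bk : PySem.Dict (Option String) (List (Int × List String))) (del : List (List String)),
      (∀ k, bk.getD k [] = pN.filter (fun p => !(PySem.Set.contains un p.1) && (PySem.List.pyGet? p.2 0 == k))) →
      (ops.map (·.1)).Nodup →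
      (bPass2 ((ops.filter (fun p => !(PySem.Set.contains uo p.1))).map (·.2)) (bk, un, c, del)).2.2.1 =
        (aPass2 pN ops (c, un, uo)).1 ∧
      (bPass2 ((ops.filter (fun p => !(PySem.Set.contains uo p.1))).map (·.2)) (bk, un, c, del)).2.1 =
        (aPass2 pN ops (c, un, uo)).2.1 ∧
      (bPass2 ((ops.filter (fun p => !(PySem.Set.contains uo p.1))).map (·.2)) (bk, un, c, del)).2.2.2 =
        del ++ (ops.filter (fun p => !(PySem.Set.contains (aPass2 pN ops (c, un, uo)).2.2 p.1))).map (·.2) ∧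
      (∀ x ∈ uo, x ∈ (aPass2 pN ops (c, un, uo)).2.2) ∧
      (∀ x, x ∈ (aPass2 pN ops (c, un, uo)).2.2 → x ∈ uo ∨ x ∈ ops.map (·.1)) := by
  intro ops
  induction ops with
  | nil =>
    intro c un uo bk del hinv _
    exact ⟨rfl, rfl, by simp [aPass2, bPass2], fun x hx => hx, fun x hx => Or.inl hx⟩
  | cons hd rest ih =>
    obtain ⟨i, oi⟩ := hd
    intro c un uo bk del hinv hnodops
    have hnodops' : (i :: rest.map (·.1)).Nodup := by simpa using hnodops
    have hnodrest : (rest.map (·.1)).Nodup := (List.nodup_cons.mp hnodops').2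
    have hinotrest : i ∉ rest.map (·.1) := (List.nodup_cons.mp hnodops').1
    by_cases hskip : i ∈ uo
    · -- skipped: matched in pass 1
      have hstepA : aPass2 pN ((i, oi) :: rest) (c, un, uo) = aPass2 pN rest (c, un, uo) := by
        rw [aPass2, if_pos (pv_contains_true _ _ hskip)]
      have hfl : ((i, oi) :: rest).filter (fun p => !(PySem.Set.contains uo p.1))
          = rest.filter (fun p => !(PySem.Set.contains uo p.1)) := by
        rw [List.filter_cons, show (!(PySem.Set.contains uo (i, oi).1)) = false by
          rw [pv_contains_true _ _ hskip]; rfl]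
        simp
      obtain ⟨c1, c2, c3, c4, c5⟩ := ih c un uo bk del hinv hnodrest
      rw [hstepA, hfl]
      refine ⟨c1, c2, ?_, c4, fun x hx => (c5 x hx).imp_right (List.mem_cons_of_mem _)⟩
      rw [c3, List.filter_cons, show (!(PySem.Set.contains (aPass2 pN rest (c, un, uo)).2.2 (i, oi).1)) = false by
        rw [pv_contains_true _ _ (c4 i hskip)]; rfl]
      simp
    · -- visited
      have hfl : ((i, oi) :: rest).filter (fun p => !(PySem.Set.contains uo p.1))
          = (i, oi) :: rest.filter (fun p => !(PySem.Set.contains uo p.1)) := by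
        rw [List.filter_cons, show (!(PySem.Set.contains uo (i, oi).1)) = true by
          rw [pv_contains_false _ _ hskip]; rfl, if_pos rfl]
      cases hq : pN.filter (fun p => !(PySem.Set.contains un p.1) && (PySem.List.pyGet? p.2 0 == PySem.List.pyGet? oi 0)) with
      | nil =>
        have hfind : aFindKey un (PySem.List.pyGet? oi 0) pN = none := by rw [aFindKey_eq, hq]; rfl
        have hgetD : bk.getD (PySem.List.pyGet? oi 0) [] = [] := by rw [hinv _, hq]
        have hstepA : aPass2 pN ((i, oi) :: rest) (c, un, uo) = aPass2 pN rest (c, un, uo) := by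
          rw [aPass2, if_neg (by rw [pv_contains_false _ _ hskip]; exact Bool.false_ne_true), hfind]
        have hstepB : bPass2 ((((i, oi) :: rest).filter (fun p => !(PySem.Set.contains uo p.1))).map (·.2)) (bk, un, c, del)
            = bPass2 ((rest.filter (fun p => !(PySem.Set.contains uo p.1))).map (·.2)) (bk, un, c, del ++ [oi]) := by
          rw [hfl, List.map_cons, bPass2, hgetD]
        obtain ⟨c1, c2, c3, c4, c5⟩ := ih c un uo bk (del ++ [oi]) hinv hnodrest
        rw [hstepA, hstepB]
        refine ⟨c1, c2, ?_, c4, fun x hx => (c5 x hx).imp_right (List.mem_cons_of_mem _)⟩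
        have hinotA : i ∉ (aPass2 pN rest (c, un, uo)).2.2 := by
          intro hx
          rcases c5 i hx with h | h
          · exact hskip h
          · exact hinotrest h
        rw [c3, List.filter_cons, show (!(PySem.Set.contains (aPass2 pN rest (c, un, uo)).2.2 (i, oi).1)) = true by
          rw [pv_contains_false _ _ hinotA]; rfl, if_pos rfl]
        simp
      | cons p₀ t =>
        obtain ⟨j, ni⟩ := p₀
        have hfind : aFindKey un (PySem.List.pyGet? oi 0) pN = some (j, ni) := by
          rw [aFindKey_eq, hq]; rfl
        have hgetD : bk.getD (PySem.List.pyGet? oi 0) [] = (j, ni) :: t := by rw [hinv _, hq]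
        have hstepA : aPass2 pN ((i, oi) :: rest) (c, un, uo)
            = aPass2 pN rest (c ++ [(oi, ni)], PySem.Set.add un j, PySem.Set.add uo i) := by
          rw [aPass2, if_neg (by rw [pv_contains_false _ _ hskip]; exact Bool.false_ne_true), hfind]
        have hstepB : bPass2 ((((i, oi) :: rest).filter (fun p => !(PySem.Set.contains uo p.1))).map (·.2)) (bk, un, c, del)
            = bPass2 ((rest.filter (fun p => !(PySem.Set.contains uo p.1))).map (·.2))
                (bk.insert (PySem.List.pyGet? oi 0) t, PySem.Set.add un j, c ++ [(oi, ni)], del) := by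
          rw [hfl, List.map_cons, bPass2, hgetD]
        have hinv' : ∀ k, (bk.insert (PySem.List.pyGet? oi 0) t).getD k []
            = pN.filter (fun p => !(PySem.Set.contains (PySem.Set.add un j) p.1) && (PySem.List.pyGet? p.2 0 == k)) := by
          intro k
          have := queue_step (fun p => PySem.List.pyGet? p.2 0) (fun p => p) pN hnod un
            (PySem.List.pyGet? oi 0) bk (by intro v; simpa using hinv v) (j, ni) t hq k
          simpa using this
        have hfilrest : rest.filter (fun p => !(PySem.Set.contains (PySem.Set.add uo i) p.1))
            = rest.filter (fun p => !(PySem.Set.contains uo p.1)) := by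
          apply List.filter_congr
          intro p hp
          have hne : p.1 ≠ i := fun h => hinotrest (h ▸ List.mem_map_of_mem hp)
          congr 1
          apply Bool.eq_iff_iff.mpr
          simp only [PySem.Set.contains_iff, PySem.Set.mem_add]
          constructor
          · intro h; rcases h with h | h
            · exact h
            · exact absurd h hne
          · exact Or.inl
        obtain ⟨c1, c2, c3, c4, c5⟩ := ih (c ++ [(oi, ni)]) (PySem.Set.add un j)
          (PySem.Set.add uo i) (bk.insert (PySem.List.pyGet? oi 0) t) del hinv' hnodrest
        rw [hstepA, hstepB, ← hfilrest]
        refine ⟨c1, c2, ?_, ?_, ?_⟩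
        · rw [c3, List.filter_cons]
          have hiA : i ∈ (aPass2 pN rest (c ++ [(oi, ni)], PySem.Set.add un j, PySem.Set.add uo i)).2.2 :=
            c4 i ((PySem.Set.mem_add _ _ _).mpr (Or.inr rfl))
          rw [show (!(PySem.Set.contains (aPass2 pN rest (c ++ [(oi, ni)], PySem.Set.add un j, PySem.Set.add uo i)).2.2 (i, oi).1)) = false by
            rw [pv_contains_true _ _ hiA]; rfl, if_neg (by simp)]
        · intro x hx
          exact c4 x ((PySem.Set.mem_add _ _ _).mpr (Or.inl hx))
        · intro x hx
          rcases c5 x hx with h | h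
          · rcases (PySem.Set.mem_add _ _ _).mp h with h' | h'
            · exact Or.inl h'
            · exact Or.inr (by simp [h'])
          · exact Or.inr (List.mem_cons_of_mem _ h)

theorem bByValue_getD (pairsN : List (Int × List String)) (v : List String) :
    (bByValue pairsN).getD v [] = (pairsN.filter (fun p => (p.2 == v))).map (·.1) := by
  have h1 : bByValue pairsN
      = (pairsN.map (fun p => (p.2, p.1))).foldl (fun d q => d.modify q.1 [] (· ++ [q.2])) PySem.Dict.empty := by
    rw [bByValue, List.foldl_map]
  rw [h1, PySem.Dict.getD_foldl_modify_append]
  simp [List.filter_map, Function.comp_def]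

theorem bByKey_getD (pairsN : List (Int × List String)) (un : PySem.Set Int) (k : Option String) :
    (bByKey pairsN un).getD k [] =
      pairsN.filter (fun p => !(PySem.Set.contains un p.1) && (PySem.List.pyGet? p.2 0 == k)) := by
  have hfun : (fun (d : PySem.Dict (Option String) (List (Int × List String))) (p : Int × List String) =>
        if PySem.Set.contains un p.1 then d else d.modify (PySem.List.pyGet? p.2 0) [] (· ++ [p]))
      = (fun d p => if (!(PySem.Set.contains un p.1)) then d.modify (PySem.List.pyGet? p.2 0) [] (· ++ [p]) else d) := by
    funext d p; cases h : PySem.Set.contains un p.1 <;> simp [h]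
  rw [bByKey, hfun, PySem.List.foldl_if_eq_foldl_filter]
  have hmap : (pairsN.filter (fun p => !(PySem.Set.contains un p.1))).foldl
        (fun d p => d.modify (PySem.List.pyGet? p.2 0) [] (· ++ [p])) PySem.Dict.empty
      = ((pairsN.filter (fun p => !(PySem.Set.contains un p.1))).map (fun p => (PySem.List.pyGet? p.2 0, p))).foldl
          (fun d q => d.modify q.1 [] (· ++ [q.2])) PySem.Dict.empty := by
    rw [List.foldl_map]
  rw [hmap, PySem.Dict.getD_foldl_modify_append]
  rw [List.filter_map]
  simp only [List.map_map, Function.comp_def]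
  rw [List.filter_filter]
  simp [Bool.and_comm]

theorem pv_foldl_skip (l : List (Int × List String)) (s : PySem.Set Int) :
    l.foldl (fun acc p => if PySem.Set.contains s p.1 then acc else acc ++ [p.2]) []
      = (l.filter (fun p => !(PySem.Set.contains s p.1))).map (·.2) := by
  have hfun : (fun (acc : List (List String)) (p : Int × List String) =>
        if PySem.Set.contains s p.1 then acc else acc ++ [p.2])
      = fun acc p => if (!(PySem.Set.contains s p.1)) then acc ++ [p.2] else acc := by
    funext acc p; cases h : PySem.Set.contains s p.1 <;> simp [h]
  rw [hfun, PySem.List.foldl_append_if]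
  simp

theorem pv_filterMap_if (l : List (Int × List String)) (s : PySem.Set Int) :
    l.filterMap (fun p => if PySem.Set.contains s p.1 then none else some p.2)
      = (l.filter (fun p => !(PySem.Set.contains s p.1))).map (·.2) := by
  induction l with
  | nil => rfl
  | cons p rest ih =>
    rw [List.filterMap_cons, List.filter_cons]
    by_cases h : PySem.Set.contains s p.1 = true
    · rw [if_pos h, show (!(PySem.Set.contains s p.1)) = false by rw [h]; rfl, if_neg (by simp), ih]
    · have h' : PySem.Set.contains s p.1 = false := by simpa using h
      rw [if_neg h, show (!(PySem.Set.contains s p.1)) = true by rw [h']; rfl, if_pos rfl,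
        List.map_cons, ih]

-- ===== VERDICT (by name: the statement is the Claim_ definition above) =====
theorem identify_changes_spec : Claim_equal_identify_changes := by
  intro old new _dom _pre
  show identify_changes old new = identify_changes_alt old new
  have hnodN : ((PySem.List.enumerate new).map (·.1)).Nodup := by
    rw [PySem.List.map_fst_enumerate]
    exact PySem.List.nodup_pyRange_one _ _
  have hnodO : ((PySem.List.enumerate old).map (·.1)).Nodup := by
    rw [PySem.List.map_fst_enumerate]
    exact PySem.List.nodup_pyRange_one _ _
  have hOld : (PySem.List.enumerate old).map (·.2) = old := PySem.List.map_snd_enumerate old 0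
  have hinv0 : ∀ v, (bByValue (PySem.List.enumerate new)).getD v []
      = ((PySem.List.enumerate new).filter
          (fun p => !(PySem.Set.contains PySem.Set.empty p.1) && (p.2 == v))).map (·.1) := by
    intro v
    rw [bByValue_getD]
    congr 1
  obtain ⟨c1, c2, c3, c4, c5, c6⟩ := pass1_rel (PySem.List.enumerate new) hnodN
    (PySem.List.enumerate old) [] PySem.Set.empty PySem.Set.empty
    (bByValue (PySem.List.enumerate new)) [] hinv0 hnodO (fun p _ h => (List.not_mem_nil h).elim)
  obtain ⟨d1, d2, d3, d4, d5⟩ := pass2_rel (PySem.List.enumerate new) hnodN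
    (PySem.List.enumerate old) []
    (aPass1 (PySem.List.enumerate new) (PySem.List.enumerate old) ([], PySem.Set.empty, PySem.Set.empty)).2.1
    (aPass1 (PySem.List.enumerate new) (PySem.List.enumerate old) ([], PySem.Set.empty, PySem.Set.empty)).2.2
    (bByKey (PySem.List.enumerate new)
      (aPass1 (PySem.List.enumerate new) (PySem.List.enumerate old) ([], PySem.Set.empty, PySem.Set.empty)).2.1)
    [] (fun k => bByKey_getD _ _ k) hnodO
  simp only [identify_changes, identify_changes_alt]
  rw [hOld] at c1 c2 c4
  rw [c1, c2, c4, List.nil_append]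
  rw [d1, d2, d3, List.nil_append, pv_foldl_skip, pv_foldl_skip, pv_filterMap_if]
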